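-- pv_equiv track=rewrite | github.com/wonniiii/Algorithm | 프로그래머스/3/12987. 숫자 게임/숫자 게임.py | solution
-- ===== SOURCE A (Python) =====
-- def solution(A, B):
--     A.sort()
--     B.sort()
--
--     a = len(A) - 1
--     b = len(B) - 1
--     score = 0
--
--     while a >= 0:
--         if B[b] > A[a]:
--             score += 1
--             b -= 1
--         a-= 1
--
--     return score
-- ===== SOURCE B (Python) =====
-- def solution(A, B):
--     A.sort()
--     B.sort()
--
--     def ok(k):
--         # can the k largest of B beat the k smallest of A pairwise?
--         return all(b > a for a, b in zip(A[:k], B[len(B) - k:]))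
--
--     lo, hi = 0, min(len(A), len(B))
--     while lo < hi:
--         mid = (lo + hi + 1) // 2
--         if ok(mid):
--             lo = mid
--         else:
--             hi = mid - 1
--     return lo
-- ===== Notes on version B (the rewrite author's own statement) =====
-- stated objective: alternative
-- what changed: Replaces A's greedy largest-to-smallest scan with a binary search on the answer k, using the monotone feasibility check 'the k largest of B pairwise beat the k smallest of A' (zip of slices); Pre_ excludes len(B) < len(A), where A's negative-index read raises or can inflate the count.
-- outside the precondition, e.g. on solution([0, 0], [5]): A returns 2, B returns 1; on solution([1], []): A raises IndexError, B returns 0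
import Mathlib
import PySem

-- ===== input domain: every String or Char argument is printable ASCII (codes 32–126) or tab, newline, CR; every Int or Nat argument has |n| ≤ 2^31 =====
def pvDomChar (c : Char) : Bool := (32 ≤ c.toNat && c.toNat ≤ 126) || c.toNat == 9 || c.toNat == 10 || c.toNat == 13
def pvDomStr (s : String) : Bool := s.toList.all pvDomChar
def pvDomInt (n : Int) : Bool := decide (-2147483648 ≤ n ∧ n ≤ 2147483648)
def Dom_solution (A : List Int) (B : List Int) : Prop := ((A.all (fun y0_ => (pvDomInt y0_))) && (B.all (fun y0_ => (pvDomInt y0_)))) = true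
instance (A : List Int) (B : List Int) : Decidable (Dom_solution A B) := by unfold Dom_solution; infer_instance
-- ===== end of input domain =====

-- B replaces A's greedy largest-to-smallest scan with a binary search on the answer k, using the
-- monotone check "the k largest of B pairwise beat the k smallest of A"; like A it sorts both
-- arguments in place, and the equivalence proved is about the return value.


-- ===== PORT A =====
-- while a >= 0: if B[b] > A[a]: score += 1; b -= 1; a -= 1
-- (B[b] via pyGet?: Python negative-index semantics; the `none` arms are Python's IndexError, outside Pre_)
def loopA (sA sB : List Int) (a b score : Int) : Int :=
  if _h : 0 ≤ a then
    match PySem.List.pyGet? sB b, PySem.List.pyGet? sA a with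
    | some yb, some xa =>
        if yb > xa then loopA sA sB (a - 1) (b - 1) (score + 1)
        else loopA sA sB (a - 1) b score
    | _, _ => score
  else score
termination_by (a + 1).toNat
decreasing_by all_goals omega

def solution (A : List Int) (B : List Int) : Int :=
  let sA := PySem.List.sorted A (fun x => x) false
  let sB := PySem.List.sorted B (fun x => x) false
  loopA sA sB ((sA.length : Int) - 1) ((sB.length : Int) - 1) 0

-- ===== PORT B =====
-- ok(k) = all(b > a for a, b in zip(A[:k], B[len(B)-k:]))
def okFn (sA sB : List Int) (k : Int) : Bool :=
  ((PySem.List.slice sA none (some k)).zip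
      (PySem.List.slice sB (some ((sB.length : Int) - k)) none)).all
    (fun p => decide (p.2 > p.1))

-- while lo < hi: mid = (lo + hi + 1) // 2; if ok(mid): lo = mid else: hi = mid - 1
def bsearchB (sA sB : List Int) (lo hi : Int) : Int :=
  if h : lo < hi then
    if okFn sA sB (PySem.Int.floordiv (lo + hi + 1) 2) then
      bsearchB sA sB (PySem.Int.floordiv (lo + hi + 1) 2) hi
    else
      bsearchB sA sB lo (PySem.Int.floordiv (lo + hi + 1) 2 - 1)
  else lo
termination_by (hi - lo).toNat
decreasing_by
  all_goals
    have hd := PySem.Int.floordiv_eq_ediv_of_pos (a := lo + hi + 1) (b := 2) (by omega)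
    omega

def solution_alt (A : List Int) (B : List Int) : Int :=
  let sA := PySem.List.sorted A (fun x => x) false
  let sB := PySem.List.sorted B (fun x => x) false
  bsearchB sA sB 0 (min (sA.length : Int) (sB.length : Int))

-- ===== PRECONDITION & SPEC =====
-- Pre_ excludes inputs with fewer B than A elements: there A's loop can drive index b below 0 and
-- read B through Python's negative-index wraparound — depending on the data A then raises IndexError
-- or returns a wraparound-inflated count (e.g. A=[0,0], B=[5] returns 2); since which of these happens
-- (or whether the value is accidentally unaffected) depends on the element values, the whole region is
-- excluded (the problem this code solves guarantees len(A) == len(B) anyway).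
def Pre_solution (A : List Int) (B : List Int) : Prop := A.length ≤ B.length
instance (A : List Int) (B : List Int) : Decidable (Pre_solution A B) := by unfold Pre_solution; infer_instance
def pvWitness_solution : List Int × List Int := ([1, 2], [2, 3])

def Spec_solution (A : List Int) (B : List Int) (out : Int) : Prop := out = solution_alt A B
instance (A : List Int) (B : List Int) (out : Int) : Decidable (Spec_solution A B out) := by unfold Spec_solution; infer_instance

-- ===== CLAIM (what is proved, stated in full; the proofs are below) =====
def Claim_equal_solution : Prop := ∀ (A : List Int) (B : List Int), Dom_solution A B → Pre_solution A B → Spec_solution A B (solution A B)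

-- ===== LEMMAS AND PROOFS =====

-- forward greedy: match each B (ascending) against the smallest not-yet-beaten A; the common yardstick
def fwd : List Int → List Int → Int
  | [], _ => 0
  | _ :: _, [] => 0
  | x :: as', b :: bs' => if b > x then 1 + fwd as' bs' else fwd (x :: as') bs'

-- backward greedy (A's algorithm) on DESCENDING lists
def bwd : List Int → List Int → Int
  | [], _ => 0
  | _ :: _, [] => 0
  | x :: ras, y :: rbs => if y > x then 1 + bwd ras rbs else bwd ras (y :: rbs)

-- feasibility: the k largest of bs pairwise beat the k smallest of as (both lists ascending)
def feas (as bs : List Int) (k : ℕ) : Prop :=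
  k ≤ as.length ∧ k ≤ bs.length ∧
    ∀ i, i < k → as.getD i 0 < bs.getD (bs.length - k + i) 0

theorem fwd_nil_right (as : List Int) : fwd as [] = 0 := by
  cases as <;> simp [fwd]

theorem fwd_nil_left (bs : List Int) : fwd [] bs = 0 := by
  cases bs <;> simp [fwd]

theorem fwd_nonneg (as bs : List Int) : 0 ≤ fwd as bs := by
  induction as, bs using fwd.induct with
  | case1 => simp [fwd]
  | case2 => simp [fwd]
  | case3 x as' b bs' h ih => simp only [fwd, if_pos h]; omega
  | case4 x as' b bs' h ih => simp only [fwd, if_neg h]; omega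

theorem fwd_le_length (as bs : List Int) : fwd as bs ≤ as.length := by
  induction as, bs using fwd.induct with
  | case1 => simp [fwd]
  | case2 => simp [fwd]; omega
  | case3 x as' b bs' h ih => simp only [fwd, if_pos h, List.length_cons]; push_cast; omega
  | case4 x as' b bs' h ih => simp only [fwd, if_neg h] at ih ⊢; omega

theorem fwd_le_length_right (as bs : List Int) : fwd as bs ≤ bs.length := by
  induction as, bs using fwd.induct with
  | case1 bs => rw [fwd_nil_left]; positivity
  | case2 => simp [fwd]
  | case3 x as' b bs' h ih => simp only [fwd, if_pos h, List.length_cons]; push_cast; omega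
  | case4 x as' b bs' h ih => simp only [fwd, if_neg h, List.length_cons] at ih ⊢; push_cast at ih ⊢; omega

-- appending an A-element no B-element beats does not change the forward greedy
theorem fwd_append_big_left (as bs : List Int) (X : Int) (hX : ∀ z ∈ bs, z ≤ X) :
    fwd (as ++ [X]) bs = fwd as bs := by
  induction as, bs using fwd.induct with
  | case1 bs =>
    rw [fwd_nil_left]
    induction bs with
    | nil => simp [fwd]
    | cons y ys ih =>
      have : ¬ y > X := by have := hX y (by simp); omega
      simp only [List.nil_append, fwd, if_neg this]
      exact ih (fun z hz => hX z (by simp [hz]))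
  | case2 x as' => simp [fwd_nil_right]
  | case3 x as' b bs' h ih =>
    simp only [List.cons_append, fwd, if_pos h]
    rw [ih (fun z hz => hX z (by simp [hz]))]
  | case4 x as' b bs' h ih =>
    simp only [List.cons_append, fwd, if_neg h]
    exact ih (fun z hz => hX z (by simp [hz]))

-- appending a B-element beating every A-element scores iff some A-element is still unmatched
theorem fwd_append_big_right (as bs : List Int) (Y : Int) (hY : ∀ z ∈ as, z < Y) :
    fwd as (bs ++ [Y]) = fwd as bs + (if fwd as bs < as.length then 1 else 0) := by
  induction as, bs using fwd.induct with
  | case1 bs => simp [fwd_nil_left]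
  | case2 x as' =>
    have hx : Y > x := hY x (by simp)
    simp [fwd, hx, fwd_nil_right]
  | case3 x as' b bs' h ih =>
    simp only [List.cons_append, fwd, if_pos h]
    rw [ih (fun z hz => hY z (by simp [hz]))]
    have h1 : fwd as' bs' ≤ as'.length := fwd_le_length as' bs'
    simp only [List.length_cons]
    split_ifs <;> omega
  | case4 x as' b bs' h ih =>
    simp only [List.cons_append, fwd, if_neg h]
    exact ih hY

-- appending a largest A-element changes the forward greedy by 0 or 1, and by 1 only if all of as matched
theorem fwd_append_left_cases (as bs : List Int) (X : Int) (hX : ∀ z ∈ as, z ≤ X) :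
    fwd (as ++ [X]) bs = fwd as bs ∨
      (fwd (as ++ [X]) bs = fwd as bs + 1 ∧ fwd as bs = as.length) := by
  induction as, bs using fwd.induct with
  | case1 bs =>
    have h1 := fwd_le_length ([X]) bs
    have h2 := fwd_nonneg ([X]) bs
    simp only [List.length_cons, List.length_nil] at h1
    simp only [List.nil_append, fwd_nil_left, List.length_nil]
    omega
  | case2 x as' => simp [fwd_nil_right]
  | case3 x as' b bs' h ih =>
    simp only [List.cons_append, fwd, if_pos h, List.length_cons]
    rcases ih (fun z hz => hX z (by simp [hz])) with h' | ⟨h', h''⟩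
    · left; omega
    · right
      refine ⟨by omega, by push_cast; omega⟩
  | case4 x as' b bs' h ih =>
    simp only [List.cons_append, fwd, if_neg h, List.length_cons]
    simp only [List.cons_append] at ih
    rcases ih hX with h' | ⟨h', h''⟩
    · left; omega
    · right
      refine ⟨by omega, by push_cast; push_cast [List.length_cons] at h''; omega⟩

-- core A-side: on descending lists with |ras| ≤ |rbs|, the backward greedy equals the forward greedy
theorem bwd_eq_fwd (ras rbs : List Int)
    (hA : ras.Pairwise (· ≥ ·)) (hB : rbs.Pairwise (· ≥ ·)) (hlen : ras.length ≤ rbs.length) :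
    bwd ras rbs = fwd ras.reverse rbs.reverse := by
  induction ras, rbs using bwd.induct with
  | case1 rbs => simp [bwd, fwd_nil_left]
  | case2 x ras => simp at hlen
  | case3 x ras y rbs h ih =>
    rw [List.pairwise_cons] at hA hB
    have hstep : bwd (x :: ras) (y :: rbs) = 1 + bwd ras rbs := by simp [bwd, h]
    rw [hstep, ih hA.2 hB.2 (by simpa using hlen)]
    simp only [List.reverse_cons]
    have hY : ∀ z ∈ ras.reverse ++ [x], z < y := by
      intro z hz
      rcases List.mem_append.mp hz with hz | hz
      · have := hA.1 z (List.mem_reverse.mp hz); omega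
      · simp at hz; omega
    rw [fwd_append_big_right _ _ _ hY]
    have hX : ∀ z ∈ ras.reverse, z ≤ x := fun z hz => hA.1 z (List.mem_reverse.mp hz)
    have hc := fwd_append_left_cases ras.reverse rbs.reverse x hX
    have hle := fwd_le_length ras.reverse rbs.reverse
    simp only [List.length_append, List.length_reverse, List.length_cons, List.length_nil] at *
    split_ifs <;> omega
  | case4 x ras y rbs h ih =>
    rw [List.pairwise_cons] at hA
    have hstep : bwd (x :: ras) (y :: rbs) = bwd ras (y :: rbs) := by simp [bwd, h]
    rw [hstep, ih hA.2 hB (by simp at hlen ⊢; omega)]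
    simp only [List.reverse_cons]
    have hX : ∀ z ∈ rbs.reverse ++ [y], z ≤ x := by
      intro z hz
      rcases List.mem_append.mp hz with hz | hz
      · rw [List.pairwise_cons] at hB
        have := hB.1 z (List.mem_reverse.mp hz); omega
      · simp at hz; omega
    rw [fwd_append_big_left ras.reverse (rbs.reverse ++ [y]) x hX]

-- A's loop computes the backward greedy on the reversed prefixes
theorem loopA_eq (sA sB : List Int) (n : ℕ) :
    ∀ (a b score : Int), (a + 1).toNat = n → -1 ≤ a → a < sA.length →
      a + ((sB.length : Int) - sA.length) ≤ b → b < sB.length → sA.length ≤ sB.length →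
      loopA sA sB a b score =
        score + bwd ((sA.take (a + 1).toNat).reverse) ((sB.take (b + 1).toNat).reverse) := by
  induction n with
  | zero =>
    intro a b score hn ha1 _ _ _ _
    have ha : a = -1 := by omega
    rw [loopA, dif_neg (by omega)]
    simp [hn, bwd]
  | succ n ih =>
    intro a b score hn ha1 ha2 hb1 hb2 hlen
    have ha : 0 ≤ a := by omega
    have hb0 : 0 ≤ b := by omega
    have hgA := PySem.List.pyGet?_eq_some_getElem sA ha (by omega)
    have hgB := PySem.List.pyGet?_eq_some_getElem sB hb0 (by omega)
    rw [loopA, dif_pos ha, hgA, hgB]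
    dsimp only
    have htA : sA.take (a + 1).toNat = sA.take a.toNat ++ [sA[a.toNat]] := by
      have : (a + 1).toNat = a.toNat + 1 := by omega
      rw [this, List.take_add_one, List.getElem?_eq_getElem (by omega)]
      simp
    have htB : sB.take (b + 1).toNat = sB.take b.toNat ++ [sB[b.toNat]] := by
      have : (b + 1).toNat = b.toNat + 1 := by omega
      rw [this, List.take_add_one, List.getElem?_eq_getElem (by omega)]
      simp
    by_cases h : sB[b.toNat] > sA[a.toNat]
    · rw [if_pos h, ih (a - 1) (b - 1) (score + 1) (by omega) (by omega) (by omega) (by omega)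
        (by omega) hlen]
      rw [htA, htB]
      simp only [List.reverse_append, List.reverse_cons, List.reverse_nil, List.nil_append,
        List.cons_append, bwd, if_pos h]
      have : (a - 1 + 1).toNat = a.toNat := by omega
      rw [this]
      have : (b - 1 + 1).toNat = b.toNat := by omega
      rw [this]
      omega
    · rw [if_neg h, ih (a - 1) b score (by omega) (by omega) (by omega) (by omega) (by omega) hlen]
      rw [htA, htB]
      simp only [List.reverse_append, List.reverse_cons, List.reverse_nil, List.nil_append,
        List.cons_append, bwd, if_neg h]
      have h3 : (a - 1 + 1).toNat = a.toNat := by omega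
      rw [h3]

-- A's port computes the forward greedy of the two sorted lists
theorem solution_eq_fwd (A B : List Int) (hpre : A.length ≤ B.length) :
    solution A B =
      fwd (PySem.List.sorted A (fun x => x) false) (PySem.List.sorted B (fun x => x) false) := by
  unfold solution
  set sA := PySem.List.sorted A (fun x => x) false with hsA
  set sB := PySem.List.sorted B (fun x => x) false with hsB
  have hlen : sA.length ≤ sB.length := by
    rw [hsA, hsB, PySem.List.length_sorted, PySem.List.length_sorted]; exact hpre
  by_cases hBnil : sB = []
  · have hAnil : sA = [] := by
      rw [hBnil] at hlen
      simp only [List.length_nil, Nat.le_zero] at hlen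
      exact List.eq_nil_of_length_eq_zero hlen
    rw [hAnil, hBnil]
    rw [loopA]
    norm_num [fwd]
  · have hBpos : 0 < sB.length := List.length_pos_of_ne_nil hBnil
    rw [loopA_eq sA sB ((sA.length : Int) - 1 + 1).toNat _ _ _ rfl (by omega) (by omega)
      (by omega) (by omega) hlen]
    have h1 : ((sA.length : Int) - 1 + 1).toNat = sA.length := by omega
    have h2 : ((sB.length : Int) - 1 + 1).toNat = sB.length := by omega
    rw [h1, h2, List.take_length, List.take_length]
    have hpA : sA.reverse.Pairwise (· ≥ ·) := by
      rw [List.pairwise_reverse]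
      exact PySem.List.sorted_pairwise A (fun x => x) |>.imp (fun h => h)
    have hpB : sB.reverse.Pairwise (· ≥ ·) := by
      rw [List.pairwise_reverse]
      exact PySem.List.sorted_pairwise B (fun x => x) |>.imp (fun h => h)
    rw [bwd_eq_fwd sA.reverse sB.reverse hpA hpB (by simpa using hlen)]
    simp

-- ===== B side =====

-- the all-over-a-zip Bool unpacked into an indexed statement
theorem zip_all_lt (xs ys : List Int) :
    ((xs.zip ys).all (fun p => decide (p.2 > p.1)) = true) ↔
      ∀ i (h1 : i < xs.length) (h2 : i < ys.length), xs[i] < ys[i] := by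
  rw [List.all_eq_true]
  constructor
  · intro h i h1 h2
    have hi : i < (xs.zip ys).length := by rw [List.length_zip]; omega
    have := h ((xs.zip ys)[i]) (List.getElem_mem hi)
    rwa [List.getElem_zip, decide_eq_true_iff] at this
  · intro h p hp
    obtain ⟨i, hi, rfl⟩ := List.mem_iff_getElem.mp hp
    rw [List.getElem_zip, decide_eq_true_iff]
    rw [List.length_zip] at hi
    exact h i (by omega) (by omega)

-- ok(k) decides feasibility
theorem ok_iff_feas (as bs : List Int) (k : ℕ) (h1 : k ≤ as.length) (h2 : k ≤ bs.length) :
    okFn as bs (k : Int) = true ↔ feas as bs k := by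
  unfold okFn
  rw [PySem.List.slice_to_natCast, ← Nat.cast_sub h2, PySem.List.slice_from_natCast, zip_all_lt]
  unfold feas
  constructor
  · intro h
    refine ⟨h1, h2, ?_⟩
    intro i hi
    have hia : i < (as.take k).length := by simp [List.length_take]; omega
    have hib : i < (bs.drop (bs.length - k)).length := by simp [List.length_drop]; omega
    have := h i hia hib
    rw [List.getElem_take, List.getElem_drop] at this
    rw [List.getD_eq_getElem _ _ (by omega : i < as.length),
      List.getD_eq_getElem _ _ (by omega : bs.length - k + i < bs.length)]
    exact this
  · intro ⟨_, _, h3⟩ i hia hib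
    rw [List.length_take] at hia
    have hik : i < k := by omega
    have := h3 i hik
    rw [List.getD_eq_getElem _ _ (by omega : i < as.length),
      List.getD_eq_getElem _ _ (by omega : bs.length - k + i < bs.length)] at this
    rw [List.getElem_take, List.getElem_drop]
    exact this

-- a sorted (ascending) list is monotone in getD over in-range indices
theorem sorted_getD_mono (bs : List Int) (hB : bs.Pairwise (· ≤ ·)) (i j : ℕ)
    (hij : i ≤ j) (hj : j < bs.length) : bs.getD i 0 ≤ bs.getD j 0 := by
  rcases Nat.eq_or_lt_of_le hij with rfl | hlt
  · exact le_rfl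
  · rw [List.getD_eq_getElem _ _ (by omega), List.getD_eq_getElem _ _ hj]
    exact List.pairwise_iff_getElem.mp hB i j (by omega) hj hlt

-- feasibility is downward closed (needs bs sorted)
theorem feas_mono (as bs : List Int) (hB : bs.Pairwise (· ≤ ·)) (k j : ℕ)
    (hf : feas as bs k) (hjk : j ≤ k) : feas as bs j := by
  obtain ⟨h1, h2, h3⟩ := hf
  refine ⟨by omega, by omega, ?_⟩
  intro i hi
  have := h3 i (by omega)
  have hmono : bs.getD (bs.length - k + i) 0 ≤ bs.getD (bs.length - j + i) 0 :=
    sorted_getD_mono bs hB _ _ (by omega) (by omega)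
  omega

-- the greedy count is feasible (needs bs sorted)
theorem feas_fwd (as bs : List Int) (hB : bs.Pairwise (· ≤ ·)) :
    feas as bs (fwd as bs).toNat := by
  induction as, bs using fwd.induct with
  | case1 bs => simp [fwd_nil_left, feas]
  | case2 x as' => simp [fwd_nil_right, feas]
  | case3 x as' b bs' h ih =>
    rw [List.pairwise_cons] at hB
    have ih' := ih hB.2
    obtain ⟨h1, h2, h3⟩ := ih'
    have hnn := fwd_nonneg as' bs'
    have hk : (fwd (x :: as') (b :: bs')).toNat = (fwd as' bs').toNat + 1 := by
      simp only [fwd, if_pos h]; omega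
    rw [hk]
    refine ⟨by simp; omega, by simp; omega, ?_⟩
    intro i hi
    set kn := (fwd as' bs').toNat with hkn
    have hidx : bs'.length + 1 - (kn + 1) = bs'.length - kn := by omega
    simp only [List.length_cons, hidx]
    match i, hi with
    | 0, _ =>
      simp only [List.getD_cons_zero, Nat.add_zero]
      rcases h0 : bs'.length - kn with _ | t
      · simpa using h
      · rw [List.getD_cons_succ]
        have ht : t < bs'.length := by omega
        rw [List.getD_eq_getElem _ _ ht]
        have := hB.1 _ (List.getElem_mem ht)
        omega
    | s + 1, hs =>
      have hlt : s < kn := by omega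
      have := h3 s hlt
      have hidx2 : bs'.length - kn + (s + 1) = (bs'.length - kn + s) + 1 := by omega
      rw [hidx2, List.getD_cons_succ, List.getD_cons_succ]
      exact this
  | case4 x as' b bs' h ih =>
    rw [List.pairwise_cons] at hB
    have ih' := ih hB.2
    obtain ⟨h1, h2, h3⟩ := ih'
    have hk : fwd (x :: as') (b :: bs') = fwd (x :: as') bs' := by
      simp only [fwd, if_neg h]
    rw [hk]
    set kn := (fwd (x :: as') bs').toNat with hkn
    refine ⟨h1, by simp; omega, ?_⟩
    intro i hi
    have hidx : bs'.length + 1 - kn + i = (bs'.length - kn + i) + 1 := by omega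
    simp only [List.length_cons, hidx, List.getD_cons_succ]
    exact h3 i hi

-- any feasible k is at most the greedy count (no sortedness needed)
theorem feas_le_fwd (as bs : List Int) (k : ℕ) (hf : feas as bs k) :
    (k : Int) ≤ fwd as bs := by
  induction as, bs using fwd.induct generalizing k with
  | case1 bs =>
    obtain ⟨h1, _, _⟩ := hf
    simp only [List.length_nil, Nat.le_zero] at h1
    simp [h1, fwd_nil_left]
  | case2 x as' =>
    obtain ⟨_, h2, _⟩ := hf
    simp only [List.length_nil, Nat.le_zero] at h2
    simp [h2, fwd_nil_right]
  | case3 x as' b bs' h ih =>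
    obtain ⟨h1, h2, h3⟩ := hf
    match k with
    | 0 => have := fwd_nonneg (x :: as') (b :: bs'); omega
    | s + 1 =>
      have hfs : feas as' bs' s := by
        refine ⟨by simpa using h1, by simpa using h2, ?_⟩
        intro i hi
        have := h3 (i + 1) (by omega)
        have hidx : bs'.length + 1 - (s + 1) + (i + 1) = (bs'.length - s + i) + 1 := by
          simp only [List.length_cons] at h2; omega
        simp only [List.length_cons, hidx, List.getD_cons_succ] at this
        exact this
      have := ih s hfs
      simp only [fwd, if_pos h]
      push_cast
      omega
  | case4 x as' b bs' h ih =>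
    obtain ⟨h1, h2, h3⟩ := hf
    simp only [List.length_cons] at h2
    have hkb : k ≤ bs'.length := by
      by_contra hk
      have hkeq : k = bs'.length + 1 := by omega
      have := h3 0 (by omega)
      simp only [hkeq, List.length_cons, Nat.sub_self, Nat.add_zero, List.getD_cons_zero] at this
      omega
    have hfs : feas (x :: as') bs' k := by
      refine ⟨h1, hkb, ?_⟩
      intro i hi
      have := h3 i hi
      have hidx : bs'.length + 1 - k + i = (bs'.length - k + i) + 1 := by omega
      simp only [List.length_cons, hidx, List.getD_cons_succ] at this
      exact this
    have := ih k hfs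
    simp only [fwd, if_neg h]
    exact this

-- the binary search returns F whenever ok decides k ≤ F on the searched range
theorem bsearch_eq (sA sB : List Int) (F : Int)
    (hok : ∀ k : Int, 0 ≤ k → k ≤ (sA.length : Int) → k ≤ (sB.length : Int) →
      (okFn sA sB k = true ↔ k ≤ F)) :
    ∀ n : ℕ, ∀ lo hi : Int, (hi - lo).toNat = n → 0 ≤ lo →
      hi ≤ min (sA.length : Int) (sB.length : Int) → lo ≤ F → F ≤ hi →
      bsearchB sA sB lo hi = F := by
  intro n
  induction n using Nat.strong_induction_on with
  | _ n ih =>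
    intro lo hi hn hlo hhi hloF hFhi
    rw [bsearchB]
    by_cases hlt : lo < hi
    · rw [dif_pos hlt]
      have hd := PySem.Int.floordiv_eq_ediv_of_pos (a := lo + hi + 1) (b := 2) (by omega)
      set mid := PySem.Int.floordiv (lo + hi + 1) 2 with hmid
      have hmid1 : lo < mid := by omega
      have hmid2 : mid ≤ hi := by omega
      have hok' := hok mid (by omega) (by omega) (by omega)
      by_cases hF : mid ≤ F
      · rw [if_pos (hok'.mpr hF)]
        exact ih (hi - mid).toNat (by omega) mid hi rfl (by omega) hhi hF hFhi
      · have : okFn sA sB mid = false := by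
          rcases Bool.eq_false_or_eq_true (okFn sA sB mid) with h | h
          · exact absurd (hok'.mp h) hF
          · exact h
        rw [this, if_neg (by simp)]
        exact ih (mid - 1 - lo).toNat (by omega) lo (mid - 1) rfl hlo (by omega) hloF (by omega)
    · rw [dif_neg hlt]
      omega

-- ===== VERDICT (by name: the statement is the Claim_ definition above) =====
theorem solution_spec : Claim_equal_solution := by
  intro A B _ hpre
  unfold Spec_solution solution_alt
  set sA := PySem.List.sorted A (fun x => x) false with hsA
  set sB := PySem.List.sorted B (fun x => x) false with hsB
  have hlen : sA.length ≤ sB.length := by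
    rw [hsA, hsB, PySem.List.length_sorted, PySem.List.length_sorted]; exact hpre
  have hpB : sB.Pairwise (· ≤ ·) := PySem.List.sorted_pairwise B (fun x => x)
  set F := fwd sA sB with hF
  have hF0 : 0 ≤ F := fwd_nonneg sA sB
  have hFa : F ≤ sA.length := fwd_le_length sA sB
  have hFb : F ≤ sB.length := fwd_le_length_right sA sB
  have hok : ∀ k : Int, 0 ≤ k → k ≤ (sA.length : Int) → k ≤ (sB.length : Int) →
      (okFn sA sB k = true ↔ k ≤ F) := by
    intro k hk0 hka hkb
    have hkc : k = ((k.toNat : ℕ) : Int) := by omega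
    rw [hkc, ok_iff_feas sA sB k.toNat (by omega) (by omega)]
    constructor
    · intro hf
      have := feas_le_fwd sA sB k.toNat hf
      omega
    · intro hkF
      exact feas_mono sA sB hpB F.toNat k.toNat
        (by have := feas_fwd sA sB hpB; rwa [← hF] at this) (by omega)
  rw [solution_eq_fwd A B hpre, ← hsA, ← hsB, ← hF]
  exact (bsearch_eq sA sB F hok (min (sA.length : Int) (sB.length : Int)).toNat 0 _ (by omega)
    (by omega) (le_refl _) (by omega) (by omega)).symm
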